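-- pv_equiv track=rewrite | github.com/BigAngryDinosaur/amazonoa | execute_processes_2/solution.py | processExecution
-- ===== SOURCE A (Python) =====
-- from typing import List
--
-- def binary_search(array: List[int], target: int, find_right: bool = False) -> int:
--     left, right = 0, len(array)
--
--     while left < right:
--         mid = (left + right) // 2
--         if array[mid] < target or (find_right and array[mid] == target):
--             left = mid + 1
--         else:
--             right = mid
--
--     return left
--
-- def processExecution(
--     values: List[int], min_thresholds: List[int], max_thresholds: List[int]
-- ) -> List[List[int]]:
--     values.sort()
--     array_length = len(values)
--
--     # Create prefix sum array to store cumulative sums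
--     prefix_sums = [0] * (array_length + 1)
--     for i in range(1, array_length + 1):
--         prefix_sums[i] = prefix_sums[i - 1] + values[i - 1]
--
--     results = []
--     for i in range(len(min_thresholds)):
--         # Find leftmost value >= min_threshold
--         left_bound = binary_search(values, min_thresholds[i])
--         # Find rightmost value <= max_threshold
--         right_bound = binary_search(values, max_thresholds[i], find_right=True)
--
--         # Calculate count of values in range and their sum
--         count = right_bound - left_bound
--         range_sum = prefix_sums[right_bound] - prefix_sums[left_bound]
--
--         results.append([count, range_sum])
--
--     return results
-- ===== SOURCE B (Python) =====
-- from typing import List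
--
-- def processExecution(
--     values: List[int], min_thresholds: List[int], max_thresholds: List[int]
-- ) -> List[List[int]]:
--     # sort kept: A mutates its argument in place
--     values.sort()
--     results = []
--     for lo, hi in zip(min_thresholds, max_thresholds):
--         below = [v for v in values if v < lo]
--         upto = [v for v in values if v <= hi]
--         results.append([len(upto) - len(below), sum(upto) - sum(below)])
--     return results
-- ===== Notes on version B (the rewrite author's own statement) =====
-- stated objective: simpler
-- what changed: Replaces A's hand-written binary search plus precomputed prefix-sum table with a direct per-query inclusion-exclusion over two list filters (count/sum of values <= max minus count/sum of values < min), keeping the in-place sort for the caller-visible mutation.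
import Mathlib
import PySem

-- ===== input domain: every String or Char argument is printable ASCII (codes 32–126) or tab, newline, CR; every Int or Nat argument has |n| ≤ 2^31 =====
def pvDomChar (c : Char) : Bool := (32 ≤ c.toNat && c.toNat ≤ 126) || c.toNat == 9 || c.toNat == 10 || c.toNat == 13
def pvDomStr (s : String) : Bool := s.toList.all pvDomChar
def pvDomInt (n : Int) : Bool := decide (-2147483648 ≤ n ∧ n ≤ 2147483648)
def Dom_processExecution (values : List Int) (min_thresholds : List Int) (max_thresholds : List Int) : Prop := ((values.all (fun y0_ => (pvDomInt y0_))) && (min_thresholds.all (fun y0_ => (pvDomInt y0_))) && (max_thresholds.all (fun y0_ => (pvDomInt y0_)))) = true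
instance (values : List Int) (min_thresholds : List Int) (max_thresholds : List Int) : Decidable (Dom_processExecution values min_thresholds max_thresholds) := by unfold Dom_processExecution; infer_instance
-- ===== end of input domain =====

-- B replaces A's hand-written binary search + prefix-sum table with per-query
-- inclusion-exclusion over two filters (simpler); both sort `values` in place,
-- the equivalence proved is about the return value.


-- ===== PORT A =====
-- the `while left < right` loop of binary_search; array[mid] is transliterated as
-- pyGetD with default 0 — the index is provably in range on every call A makes
def bsLoop (array : List Int) (target : Int) (find_right : Bool) (left right : Int) : Int :=
  if _h : left < right then
    let mid := PySem.Int.floordiv (left + right) 2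
    let a := PySem.List.pyGetD array mid 0
    if a < target ∨ (find_right = true ∧ a = target) then
      bsLoop array target find_right (mid + 1) right
    else
      bsLoop array target find_right left mid
  else left
termination_by (right - left).toNat
decreasing_by
  · have h1 : left ≤ PySem.Int.floordiv (left + right) 2 :=
      (PySem.Int.le_floordiv_iff_mul_le (by omega)).mpr (by omega)
    omega
  · have h2 : PySem.Int.floordiv (left + right) 2 < right :=
      (PySem.Int.floordiv_lt_iff_lt_mul (by omega)).mpr (by omega)
    omega

def binary_search (array : List Int) (target : Int) (find_right : Bool) : Int :=
  bsLoop array target find_right 0 array.length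

def processExecution (values : List Int) (min_thresholds : List Int) (max_thresholds : List Int) : List (List Int) :=
  let vs := PySem.List.sorted values (fun x => x) false
  let array_length := vs.length
  let prefix_sums : List Int := List.replicate (array_length + 1) 0
  let ps := (PySem.List.pyRange 1 ((array_length : Int) + 1) 1).foldl
    (fun ps i =>
      PySem.List.pySetD ps i (PySem.List.pyGetD ps (i - 1) 0 + PySem.List.pyGetD vs (i - 1) 0))
    prefix_sums
  (PySem.List.pyRange 0 (min_thresholds.length : Int) 1).foldl
    (fun results i =>
      let left_bound := binary_search vs (PySem.List.pyGetD min_thresholds i 0) false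
      let right_bound := binary_search vs (PySem.List.pyGetD max_thresholds i 0) true
      let count := right_bound - left_bound
      let range_sum := PySem.List.pyGetD ps right_bound 0 - PySem.List.pyGetD ps left_bound 0
      results ++ [[count, range_sum]])
    []

-- ===== PORT B =====
def processExecution_alt (values : List Int) (min_thresholds : List Int) (max_thresholds : List Int) : List (List Int) :=
  let vs := PySem.List.sorted values (fun x => x) false
  (min_thresholds.zip max_thresholds).map (fun q =>
    let below := vs.filter (fun v => v < q.1)
    let upto := vs.filter (fun v => v ≤ q.2)
    [(upto.length : Int) - (below.length : Int), upto.sum - below.sum])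

-- ===== PRECONDITION & SPEC =====
-- Pre_ excludes only the inputs where A raises IndexError: a max_thresholds list
-- shorter than min_thresholds (A indexes max_thresholds[i] for every i < len(min_thresholds)).
def Pre_processExecution (values : List Int) (min_thresholds : List Int) (max_thresholds : List Int) : Prop :=
  min_thresholds.length ≤ max_thresholds.length
instance (values : List Int) (min_thresholds : List Int) (max_thresholds : List Int) : Decidable (Pre_processExecution values min_thresholds max_thresholds) := by unfold Pre_processExecution; infer_instance

def pvWitness_processExecution : List Int × List Int × List Int := ([3, 1, 2], [1, 3], [2, 3])

def Spec_processExecution (values : List Int) (min_thresholds : List Int) (max_thresholds : List Int) (out : List (List Int)) : Prop := out = processExecution_alt values min_thresholds max_thresholds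
instance (values : List Int) (min_thresholds : List Int) (max_thresholds : List Int) (out : List (List Int)) : Decidable (Spec_processExecution values min_thresholds max_thresholds out) := by unfold Spec_processExecution; infer_instance

-- ===== CLAIM (what is proved, stated in full; the proofs are below) =====
def Claim_equal_processExecution : Prop := ∀ (values : List Int) (min_thresholds : List Int) (max_thresholds : List Int), Dom_processExecution values min_thresholds max_thresholds → Pre_processExecution values min_thresholds max_thresholds → Spec_processExecution values min_thresholds max_thresholds (processExecution values min_thresholds max_thresholds)


-- ===== LEMMAS AND PROOFS =====

-- sorted + downward-closed p: p holds exactly on the first countP elements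
lemma sorted_getElem_iff (p : Int → Bool) (hp : ∀ a b : Int, a ≤ b → p b = true → p a = true) :
    ∀ (vs : List Int), vs.Pairwise (· ≤ ·) → ∀ (j : Nat) (hj : j < vs.length),
      (p vs[j] = true ↔ j < vs.countP p) := by
  intro vs
  induction vs with
  | nil => intro _ j hj; simp at hj
  | cons x xs ih =>
    intro hs j hj
    have hhead : ∀ y ∈ xs, x ≤ y := (List.pairwise_cons.mp hs).1
    have htail := (List.pairwise_cons.mp hs).2
    by_cases hx : p x = true
    · cases j with
      | zero => simp [hx]
      | succ j =>
        have hj' : j < xs.length := by simpa using hj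
        simpa [List.countP_cons, hx] using ih htail j hj'
    · have hz : xs.countP p = 0 := by
        rw [List.countP_eq_zero]
        intro a ha hq
        exact hx (hp x a (hhead a ha) hq)
      cases j with
      | zero => simp [hx, hz]
      | succ j =>
        have hj' : j < xs.length := by simpa using hj
        have hzz := List.countP_eq_zero.mp hz
        have hi : (if p x = true then 1 else 0) = 0 := by simp [hx]
        simp only [List.getElem_cons_succ, List.countP_cons, hz, hi]
        constructor
        · intro h; exact absurd h (hzz _ (List.getElem_mem hj'))
        · intro h; omega

-- sorted + downward-closed p: the satisfying elements are the first countP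
lemma sorted_filter_eq_take (p : Int → Bool) (hp : ∀ a b : Int, a ≤ b → p b = true → p a = true) :
    ∀ (vs : List Int), vs.Pairwise (· ≤ ·) → vs.filter p = vs.take (vs.countP p) := by
  intro vs
  induction vs with
  | nil => intro _; simp
  | cons x xs ih =>
    intro hs
    have hhead : ∀ y ∈ xs, x ≤ y := (List.pairwise_cons.mp hs).1
    have htail := (List.pairwise_cons.mp hs).2
    by_cases hx : p x = true
    · simp [hx, ih htail]
    · have hz : xs.countP p = 0 := by
        rw [List.countP_eq_zero]
        intro a ha hq
        exact hx (hp x a (hhead a ha) hq)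
      have hf : xs.filter p = [] := by
        rw [List.filter_eq_nil_iff]
        intro a ha hq
        exact hx (hp x a (hhead a ha) hq)
      simp [hx, hz, hf]

-- the while-loop of binary_search lands on the boundary k
lemma bsLoop_count (vs : List Int) (t : Int) (fr : Bool) (k : Nat)
    (hk : ∀ (j : Nat) (hj : j < vs.length),
      ((vs[j] < t ∨ (fr = true ∧ vs[j] = t)) ↔ j < k)) :
    ∀ (left right : Int), 0 ≤ left → left ≤ (k : Int) → (k : Int) ≤ right →
      right ≤ (vs.length : Int) → bsLoop vs t fr left right = (k : Int) := by
  intro left right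
  fun_induction bsLoop vs t fr left right with
  | case1 left right h mid a hcond ihr =>
    intro h0 hlk hkr hrn
    have hm1 : left ≤ mid := (PySem.Int.le_floordiv_iff_mul_le (by omega)).mpr (by omega)
    have hm2 : mid < right := (PySem.Int.floordiv_lt_iff_lt_mul (by omega)).mpr (by omega)
    have hmn : mid.toNat < vs.length := by omega
    have ha : a = vs[mid.toNat] :=
      PySem.List.pyGetD_eq_getElem vs (0 : Int) (by omega) (by omega)
    have hmk : mid.toNat < k := (hk mid.toNat hmn).mp (by rw [← ha]; exact hcond)
    exact ihr (by omega) (by omega) hkr hrn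
  | case2 left right h mid a hcond ihr =>
    intro h0 hlk hkr hrn
    have hm1 : left ≤ mid := (PySem.Int.le_floordiv_iff_mul_le (by omega)).mpr (by omega)
    have hm2 : mid < right := (PySem.Int.floordiv_lt_iff_lt_mul (by omega)).mpr (by omega)
    have hmn : mid.toNat < vs.length := by omega
    have ha : a = vs[mid.toNat] :=
      PySem.List.pyGetD_eq_getElem vs (0 : Int) (by omega) (by omega)
    have hmk : ¬ mid.toNat < k := fun hlt => hcond (by rw [ha]; exact (hk mid.toNat hmn).mpr hlt)
    exact ihr h0 hlk (by omega) (by omega)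
  | case3 left right h => intro h0 hlk hkr hrn; omega

-- invariant of A's prefix-sum-building loop
lemma psFold_getD (vs : List Int) :
    ∀ (i : Nat), i ≤ vs.length →
      (((PySem.List.pyRange 1 ((i : Int) + 1) 1).foldl
          (fun ps j =>
            PySem.List.pySetD ps j (PySem.List.pyGetD ps (j - 1) 0 + PySem.List.pyGetD vs (j - 1) 0))
          (List.replicate (vs.length + 1) 0)).length = vs.length + 1) ∧
      (∀ k : Nat, k ≤ vs.length →
        PySem.List.pyGetD
          ((PySem.List.pyRange 1 ((i : Int) + 1) 1).foldl
            (fun ps j =>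
              PySem.List.pySetD ps j (PySem.List.pyGetD ps (j - 1) 0 + PySem.List.pyGetD vs (j - 1) 0))
            (List.replicate (vs.length + 1) 0)) (k : Int) 0
          = if k ≤ i then (vs.take k).sum else 0) := by
  intro i
  induction i with
  | zero =>
    intro _
    have hr : PySem.List.pyRange 1 ((0 : Int) + 1) 1 = [] := by decide
    simp only [Nat.cast_zero]
    rw [hr]
    constructor
    · simp
    · intro k hk
      rw [PySem.List.pyGetD_natCast]
      rcases Nat.eq_zero_or_pos k with h0 | h0
      · subst h0; simp
      · rw [if_neg (by omega)]
        simp [List.getD_eq_getElem?_getD]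
  | succ i ih =>
    intro hle
    have hi : i ≤ vs.length := by omega
    obtain ⟨ihlen, ihget⟩ := ih hi
    have hcast : ((i + 1 : Nat) : Int) + 1 = ((i : Int) + 1) + 1 := by push_cast; ring
    have hr : PySem.List.pyRange 1 (((i + 1 : Nat) : Int) + 1) 1
        = PySem.List.pyRange 1 ((i : Int) + 1) 1 ++ [(i : Int) + 1] := by
      rw [hcast, PySem.List.pyRange_one_succ_right (by omega)]
    rw [hr, List.foldl_append]
    set prev := (PySem.List.pyRange 1 ((i : Int) + 1) 1).foldl
      (fun ps j =>
        PySem.List.pySetD ps j (PySem.List.pyGetD ps (j - 1) 0 + PySem.List.pyGetD vs (j - 1) 0))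
      (List.replicate (vs.length + 1) 0) with hprev
    simp only [List.foldl_cons, List.foldl_nil]
    have hsub : ((i : Int) + 1) - 1 = (i : Int) := by ring
    have hvget : PySem.List.pyGetD vs ((i : Int)) 0 = vs[i]'(by omega) :=
      PySem.List.pyGetD_eq_getElem vs (0 : Int) (by omega) (by simpa using (by omega : i < vs.length))
    have hval : PySem.List.pyGetD prev ((i : Int) + 1 - 1) 0 + PySem.List.pyGetD vs ((i : Int) + 1 - 1) 0
        = (vs.take (i + 1)).sum := by
      rw [hsub, hvget, ihget i hi]
      simp only [le_refl, if_pos]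
      exact (List.sum_take_succ vs i (by omega)).symm
    rw [hval]
    constructor
    · rw [PySem.List.length_pySetD, ihlen]
    · intro k hk
      have hic : ((i : Int) + 1) = ((i + 1 : Nat) : Int) := by push_cast; ring
      rw [hic, PySem.List.pyGetD_pySetD_natCast prev (i+1) k _ 0 (by omega)]
      by_cases hki : k = i + 1
      · simp [hki]
      · rw [if_neg hki, ihget k hk]
        by_cases hk2 : k ≤ i
        · rw [if_pos hk2, if_pos (by omega)]
        · rw [if_neg hk2, if_neg (by omega)]

-- one query: binary-search bounds + prefix sums = inclusion-exclusion over filters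
lemma query_eq (vs : List Int) (hsort : vs.Pairwise (· ≤ ·)) (ps : List Int)
    (hps : ∀ k : Nat, k ≤ vs.length → PySem.List.pyGetD ps (k : Int) 0 = (vs.take k).sum)
    (lo hi : Int) :
    [binary_search vs hi true - binary_search vs lo false,
     PySem.List.pyGetD ps (binary_search vs hi true) 0
       - PySem.List.pyGetD ps (binary_search vs lo false) 0]
    = [((vs.filter (fun v => v ≤ hi)).length : Int) - ((vs.filter (fun v => v < lo)).length : Int),
       (vs.filter (fun v => v ≤ hi)).sum - (vs.filter (fun v => v < lo)).sum] := by
  have hpl : ∀ a b : Int, a ≤ b → (decide (b < lo)) = true → (decide (a < lo)) = true := by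
    intro a b hab h; simp at h ⊢; omega
  have hpr : ∀ a b : Int, a ≤ b → (decide (b ≤ hi)) = true → (decide (a ≤ hi)) = true := by
    intro a b hab h; simp at h ⊢; omega
  set kl := vs.countP (fun v => decide (v < lo)) with hkl
  set kr := vs.countP (fun v => decide (v ≤ hi)) with hkr
  have hbl : binary_search vs lo false = (kl : Int) := by
    apply bsLoop_count vs lo false kl _ 0 vs.length (by omega)
      (by exact_mod_cast Nat.zero_le kl) (by exact_mod_cast List.countP_le_length)
      (le_refl _)
    intro j hj
    have := sorted_getElem_iff (fun v => decide (v < lo)) hpl vs hsort j hj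
    simp at this
    simpa using this
  have hbr : binary_search vs hi true = (kr : Int) := by
    apply bsLoop_count vs hi true kr _ 0 vs.length (by omega)
      (by exact_mod_cast Nat.zero_le kr) (by exact_mod_cast List.countP_le_length)
      (le_refl _)
    intro j hj
    have := sorted_getElem_iff (fun v => decide (v ≤ hi)) hpr vs hsort j hj
    simp at this
    rw [← this]
    constructor
    · intro h; omega
    · intro h; rcases lt_or_eq_of_le h with h' | h'
      · exact Or.inl h'
      · exact Or.inr ⟨rfl, h'⟩
  have hfl : vs.filter (fun v => decide (v < lo)) = vs.take kl :=
    sorted_filter_eq_take _ hpl vs hsort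
  have hfr : vs.filter (fun v => decide (v ≤ hi)) = vs.take kr :=
    sorted_filter_eq_take _ hpr vs hsort
  rw [hbl, hbr, hps kl List.countP_le_length, hps kr List.countP_le_length, hfr, hfl]
  have h1 : (vs.take kr).length = kr :=
    List.length_take_of_le List.countP_le_length
  have h2 : (vs.take kl).length = kl :=
    List.length_take_of_le List.countP_le_length
  rw [h1, h2]

theorem main_eq (values mins maxs : List Int) (hpre : mins.length ≤ maxs.length) :
    processExecution values mins maxs = processExecution_alt values mins maxs := by
  unfold processExecution processExecution_alt
  dsimp only
  set vs := PySem.List.sorted values (fun x => x) false with hvs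
  have hsort : vs.Pairwise (· ≤ ·) := PySem.List.sorted_pairwise values (fun x => x)
  obtain ⟨hlen, hget⟩ := psFold_getD vs vs.length (le_refl _)
  set ps := (PySem.List.pyRange 1 ((vs.length : Int) + 1) 1).foldl
    (fun ps j =>
      PySem.List.pySetD ps j (PySem.List.pyGetD ps (j - 1) 0 + PySem.List.pyGetD vs (j - 1) 0))
    (List.replicate (vs.length + 1) 0) with hps
  have hget' : ∀ k : Nat, k ≤ vs.length → PySem.List.pyGetD ps (k : Int) 0 = (vs.take k).sum := by
    intro k hk
    rw [hget k hk, if_pos hk]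
  rw [PySem.List.foldl_append_singleton_eq_map, List.nil_append,
    PySem.List.pyRange_zero_natCast, List.map_map]
  apply List.ext_getElem
  · simp [List.length_zip]; omega
  · intro k hk1 hk2
    simp only [List.getElem_map, List.getElem_range, Function.comp_apply, List.getElem_zip]
    have hkm : k < mins.length := by simpa using hk1
    have hkx : k < maxs.length := by omega
    rw [PySem.List.pyGetD_eq_getElem mins (0 : Int) (by omega) (by simpa using hkm),
        PySem.List.pyGetD_eq_getElem maxs (0 : Int) (by omega) (by simpa using hkx)]
    simpa using query_eq vs hsort ps hget' (mins[k]'(by simpa using hkm)) (maxs[k]'(by simpa using hkx))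

-- ===== VERDICT (by name: the statement is the Claim_ definition above) =====
theorem processExecution_spec : Claim_equal_processExecution := by
  intro values mins maxs _ hpre
  unfold Spec_processExecution
  exact main_eq values mins maxs hpre
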